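-- pv_equiv track=rewrite | github.com/Talha4543/Games-of-thrones-personality-matcher-project | app.py | fetch_image
-- ===== SOURCE A (Python) =====
-- def fetch_image(name, api_data):
--     # Exact match first
--     for item in api_data:
--         if item['fullName'] == name:
--             return item['imageUrl']
--     # Partial match
--     for item in api_data:
--         if name.lower() in item['fullName'].lower():
--             return item['imageUrl']
--     return None
-- ===== SOURCE B (Python) =====
-- def fetch_image(name, api_data):
--     candidate = None
--     for item in api_data:
--         if item['fullName'] == name:
--             return item['imageUrl']
--         if candidate is None and name.lower() in item['fullName'].lower():
--             candidate = item
--     return candidate['imageUrl'] if candidate is not None else None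
-- ===== Notes on version B (the rewrite author's own statement) =====
-- stated objective: alternative
-- what changed: Replaces A's two sequential scans (exact pass, then partial pass) with a single pass that remembers the first partially-matching item and reads its imageUrl only after the whole list has been checked for an exact match.
import Mathlib
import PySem

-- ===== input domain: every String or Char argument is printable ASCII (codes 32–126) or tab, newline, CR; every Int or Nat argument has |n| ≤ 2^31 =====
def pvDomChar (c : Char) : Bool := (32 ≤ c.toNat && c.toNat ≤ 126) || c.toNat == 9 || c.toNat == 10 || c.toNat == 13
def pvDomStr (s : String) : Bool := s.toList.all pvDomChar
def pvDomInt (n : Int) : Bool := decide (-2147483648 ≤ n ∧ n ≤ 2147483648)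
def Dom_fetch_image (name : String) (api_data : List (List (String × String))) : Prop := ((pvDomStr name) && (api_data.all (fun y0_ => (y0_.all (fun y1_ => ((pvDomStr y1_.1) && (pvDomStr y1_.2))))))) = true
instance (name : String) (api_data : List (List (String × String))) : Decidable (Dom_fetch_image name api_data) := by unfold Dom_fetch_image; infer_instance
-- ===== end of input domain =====

-- B replaces A's two sequential scans with one pass that remembers the first partially-matching
-- item and reads its imageUrl only at the end (objective: alternative decomposition, same cost).


-- ===== PORT A =====
-- A's first loop: `return item['imageUrl']` at the first exact fullName match.
-- `some r` = the loop executed `return r`; `none` = the loop fell through.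
-- item['k'] is the first pair with key k (assoc-list dict); a missing key (KeyError in Python)
-- is read as getD "" / a `none` result here — such inputs are excluded by Pre_.
def loopExactA (name : String) : List (List (String × String)) → Option (Option String)
  | [] => none
  | item :: rest =>
      if (((item.find? (fun p => p.1 == "fullName")).map (·.2)).getD "" == name) then
        some ((item.find? (fun p => p.1 == "imageUrl")).map (·.2))
      else loopExactA name rest

-- A's second loop: `return item['imageUrl']` at the first partial (case-insensitive) match.
def loopPartialA (name : String) : List (List (String × String)) → Option (Option String)
  | [] => none
  | item :: rest =>
      if PySem.Str.isIn (PySem.Str.lower name)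
          (PySem.Str.lower (((item.find? (fun p => p.1 == "fullName")).map (·.2)).getD "")) then
        some ((item.find? (fun p => p.1 == "imageUrl")).map (·.2))
      else loopPartialA name rest

def fetch_image (name : String) (api_data : List (List (String × String))) : Option String :=
  match loopExactA name api_data with
  | some r => r
  | none =>
      match loopPartialA name api_data with
      | some r => r
      | none => none

-- ===== PORT B =====
-- helpers of Source B's single pass
def fullnameOf (item : List (String × String)) : String :=
  (((item.find? (fun p => p.1 == "fullName")).map (·.2)).getD "")
def imageOf (item : List (String × String)) : Option String :=
  ((item.find? (fun p => p.1 == "imageUrl")).map (·.2))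

-- Source B's loop: carries `candidate`, the first partially-matching ITEM seen so far;
-- its 'imageUrl' is only read after the loop.
def scanB (name : String) : List (List (String × String)) → Option (List (String × String)) → Option String
  | [], cand => match cand with | some it => imageOf it | none => none
  | item :: rest, cand =>
      if fullnameOf item == name then imageOf item
      else
        scanB name rest
          (if cand.isNone &&
              PySem.Str.isIn (PySem.Str.lower name) (PySem.Str.lower (fullnameOf item)) then
            some item
          else cand)

def fetch_image_alt (name : String) (api_data : List (List (String × String))) : Option String :=
  scanB name api_data none

-- ===== PRECONDITION & SPEC =====
-- Pre_ is exactly "Python A returns normally" (no KeyError): the first item that either lacks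
-- 'fullName' or exactly matches must be an exact match carrying 'imageUrl'; failing an exact
-- match, the first partial match must carry 'imageUrl'. It excludes no input A returns on.
def Pre_fetch_image (name : String) (api_data : List (List (String × String))) : Prop :=
  (match api_data.find? (fun it =>
      !((it.find? (fun p => p.1 == "fullName")).isSome) ||
      (((it.find? (fun p => p.1 == "fullName")).map (·.2)).getD "" == name)) with
   | some it =>
      (it.find? (fun p => p.1 == "fullName")).isSome &&
      (it.find? (fun p => p.1 == "imageUrl")).isSome
   | none =>
      match api_data.find? (fun it => PySem.Str.isIn (PySem.Str.lower name)
          (PySem.Str.lower (((it.find? (fun p => p.1 == "fullName")).map (·.2)).getD ""))) with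
      | some it => (it.find? (fun p => p.1 == "imageUrl")).isSome
      | none => true) = true
instance (name : String) (api_data : List (List (String × String))) : Decidable (Pre_fetch_image name api_data) := by unfold Pre_fetch_image; infer_instance

def pvWitness_fetch_image : String × (List (List (String × String))) :=
  ("jon", [[("fullName", "Jon Snow"), ("imageUrl", "u1")], [("fullName", "jon"), ("imageUrl", "u2")]])

def Spec_fetch_image (name : String) (api_data : List (List (String × String))) (out : Option String) : Prop := out = fetch_image_alt name api_data
instance (name : String) (api_data : List (List (String × String))) (out : Option String) : Decidable (Spec_fetch_image name api_data out) := by unfold Spec_fetch_image; infer_instance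

-- ===== CLAIM =====
def Claim_equal_fetch_image : Prop := ∀ (name : String) (api_data : List (List (String × String))), Dom_fetch_image name api_data → Pre_fetch_image name api_data → Spec_fetch_image name api_data (fetch_image name api_data)

-- ===== LEMMAS AND PROOFS =====

-- Invariant of B's single pass: with candidate `cand` carried in, the result is A's exact pass
-- if it returns, else the candidate's image, else A's partial pass. (Holds for ALL inputs.)
theorem scanB_eq (name : String) (l : List (List (String × String)))
    (cand : Option (List (String × String))) :
    scanB name l cand =
      match loopExactA name l with
      | some r => r
      | none =>
        match cand with
        | some it => imageOf it
        | none => match loopPartialA name l with | some r => r | none => none := by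
  induction l generalizing cand with
  | nil => cases cand <;> simp [scanB, loopExactA, loopPartialA]
  | cons item rest ih =>
    cases hex : (((item.find? (fun p => p.1 == "fullName")).map (·.2)).getD "" == name) with
    | true => simp [scanB, loopExactA, fullnameOf, imageOf, hex]
    | false =>
      simp only [scanB, loopExactA, loopPartialA, fullnameOf, imageOf, hex,
        Bool.false_eq_true, if_false]
      rw [ih]
      cases hA : loopExactA name rest with
      | some r => simp
      | none =>
        cases cand with
        | some it => simp [imageOf]
        | none =>
          by_cases hpm : PySem.Str.isIn (PySem.Str.lower name)
              (PySem.Str.lower (((item.find? (fun p => p.1 == "fullName")).map (·.2)).getD "")) = true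
          · simp only [hpm, if_true, Option.isNone_none, Bool.true_and, imageOf]
          · rw [Bool.not_eq_true] at hpm
            simp only [hpm, Bool.false_eq_true, if_false, Option.isNone_none, Bool.true_and]

-- ===== VERDICT =====
theorem fetch_image_spec : Claim_equal_fetch_image := by
  intro name api_data _ _
  unfold Spec_fetch_image fetch_image fetch_image_alt
  rw [scanB_eq]
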